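-- pv_equiv track=rewrite | github.com/ulasb/advent-of-code-python | 2015/day_6/day6.py | process_direction_part1
-- ===== SOURCE A (Python) =====
-- from typing import List, Tuple
--
-- def process_direction_part1(grid: List[List[int]], command: str,
--                            start_x: int, start_y: int, end_x: int, end_y: int) -> int:
--     """Process a direction for Part 1 (on/off lights). Returns the change in light count."""
--     total_change = 0
--
--     for x in range(start_x, end_x + 1):
--         for y in range(start_y, end_y + 1):
--             if command == "toggle":
--                 if grid[x][y]:
--                     grid[x][y] = 0
--                     total_change -= 1
--                 else:
--                     grid[x][y] = 1
--                     total_change += 1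
--             elif command == "turn on":
--                 if not grid[x][y]:
--                     grid[x][y] = 1
--                     total_change += 1
--             elif command == "turn off":
--                 if grid[x][y]:
--                     grid[x][y] = 0
--                     total_change -= 1
--     return total_change
-- ===== SOURCE B (Python) =====
-- from typing import List
--
--
-- def process_direction_part1(grid: List[List[int]], command: str,
--                             start_x: int, start_y: int, end_x: int, end_y: int) -> int:
--     """Count-then-formula re-implementation: one counting pass over the rectangle,
--     a closed formula for the returned change, then one mutation pass."""
--     if command not in ("turn on", "turn off", "toggle"):
--         return 0
--     xs = range(start_x, end_x + 1)
--     ys = range(start_y, end_y + 1)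
--     area = len(xs) * len(ys)
--     on_count = sum(1 for x in xs for y in ys if grid[x][y])
--     # mutation pass (same in-place effect as the original)
--     for x in xs:
--         for y in ys:
--             v = grid[x][y]
--             if command == "toggle":
--                 grid[x][y] = 0 if v else 1
--             elif command == "turn on":
--                 if not v:
--                     grid[x][y] = 1
--             else:
--                 if v:
--                     grid[x][y] = 0
--     if command == "turn on":
--         return area - on_count
--     if command == "turn off":
--         return -on_count
--     return area - 2 * on_count
-- ===== Notes on version B (the rewrite author's own statement) =====
-- stated objective: alternative
-- what changed: B replaces A's per-cell conditional increments of an accumulator by one counting pass over the rectangle plus a closed formula (turn on: area-on_count, turn off: -on_count, toggle: area-2*on_count), with the in-place mutation done in a separate pass after the count.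
-- outside the precondition, e.g. on process_direction_part1([[1], [0]], 'toggle', -2, 0, 0, 0): A returns 1, B returns -1
import Mathlib
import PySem

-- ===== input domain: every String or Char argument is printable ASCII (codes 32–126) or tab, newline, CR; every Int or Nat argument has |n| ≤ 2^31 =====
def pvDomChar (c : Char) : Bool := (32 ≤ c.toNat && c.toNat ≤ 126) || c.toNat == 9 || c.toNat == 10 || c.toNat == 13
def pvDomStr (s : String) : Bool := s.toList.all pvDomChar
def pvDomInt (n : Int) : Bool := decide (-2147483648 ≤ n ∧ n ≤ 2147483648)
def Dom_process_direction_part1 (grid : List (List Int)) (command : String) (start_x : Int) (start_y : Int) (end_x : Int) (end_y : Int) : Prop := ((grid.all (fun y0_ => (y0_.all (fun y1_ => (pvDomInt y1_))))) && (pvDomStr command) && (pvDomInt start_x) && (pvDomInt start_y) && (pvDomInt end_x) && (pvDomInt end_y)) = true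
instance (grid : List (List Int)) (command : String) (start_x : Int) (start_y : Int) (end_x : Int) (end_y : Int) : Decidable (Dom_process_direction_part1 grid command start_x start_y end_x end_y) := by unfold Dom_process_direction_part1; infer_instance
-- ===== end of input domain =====

-- B computes the returned change by one counting pass plus a closed formula instead of A's
-- per-cell conditional accumulator; both Pythons mutate grid in place identically, and the
-- equivalence proved here is about the RETURN value only.

-- ===== PORT A =====
-- Loop body of A: reads use pyGet? (none = IndexError, excluded by Pre_); the in-place
-- writes grid[x][y] = v use x.toNat/y.toNat, exact for the non-negative indices Pre_ admits.
def pdA_step (command : String) (x y : Int) (st : List (List Int) × Int) : List (List Int) × Int :=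
  match PySem.List.pyGet? st.1 x with
  | none => st
  | some row =>
    match PySem.List.pyGet? row y with
    | none => st
    | some v =>
      if command = "toggle" then
        if v ≠ 0 then (st.1.set x.toNat (row.set y.toNat 0), st.2 - 1)
        else (st.1.set x.toNat (row.set y.toNat 1), st.2 + 1)
      else if command = "turn on" then
        if ¬ v ≠ 0 then (st.1.set x.toNat (row.set y.toNat 1), st.2 + 1) else st
      else if command = "turn off" then
        if v ≠ 0 then (st.1.set x.toNat (row.set y.toNat 0), st.2 - 1) else st
      else st

def process_direction_part1 (grid : List (List Int)) (command : String) (start_x : Int) (start_y : Int) (end_x : Int) (end_y : Int) : Int :=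
  ((PySem.List.pyRange start_x (end_x + 1) 1).foldl
    (fun st x => (PySem.List.pyRange start_y (end_y + 1) 1).foldl (fun st2 y => pdA_step command x y st2) st)
    (grid, 0)).2

-- ===== PORT B =====
-- B's counting pass 'sum(1 for x in xs for y in ys if grid[x][y])'.
def pdB_count (grid : List (List Int)) (xs ys : List Int) : Int :=
  xs.foldl (fun a x =>
    ys.foldl (fun a2 y =>
      match PySem.List.pyGet? grid x with
      | none => a2
      | some row =>
        match PySem.List.pyGet? row y with
        | none => a2
        | some v => if v ≠ 0 then a2 + 1 else a2) a) 0

-- B's in-place mutation pass does not affect the value B returns, so this pure port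
-- (return value only) omits it.
def process_direction_part1_alt (grid : List (List Int)) (command : String) (start_x : Int) (start_y : Int) (end_x : Int) (end_y : Int) : Int :=
  if command = "turn on" ∨ command = "turn off" ∨ command = "toggle" then
    let xs := PySem.List.pyRange start_x (end_x + 1) 1
    let ys := PySem.List.pyRange start_y (end_y + 1) 1
    let area : Int := (xs.length : Int) * (ys.length : Int)
    let on_count := pdB_count grid xs ys
    if command = "turn on" then area - on_count
    else if command = "turn off" then - on_count
    else area - 2 * on_count
  else 0

-- ===== PRECONDITION & SPEC =====
-- Pre_ excludes (for the three recognized commands with a nonempty rectangle) inputs where A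
-- raises IndexError (an index past the end of grid or of a visited row) and inputs with
-- negative start indices, where Python's accidental negative-index wraparound can make the
-- rectangle loop visit the same cell twice, so that A's sequential in-place result is an
-- artefact of its accumulation order that no one-pass count can match.
def Pre_process_direction_part1 (grid : List (List Int)) (command : String) (start_x : Int) (start_y : Int) (end_x : Int) (end_y : Int) : Prop :=
  (command = "toggle" ∨ command = "turn on" ∨ command = "turn off") →
  start_x ≤ end_x → start_y ≤ end_y →
  (0 ≤ start_x ∧ end_x < (grid.length : Int) ∧ 0 ≤ start_y ∧
   ∀ p ∈ grid.zipIdx, start_x ≤ (p.2 : Int) → (p.2 : Int) ≤ end_x → end_y < (p.1.length : Int))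
instance (grid : List (List Int)) (command : String) (start_x : Int) (start_y : Int) (end_x : Int) (end_y : Int) : Decidable (Pre_process_direction_part1 grid command start_x start_y end_x end_y) := by unfold Pre_process_direction_part1; infer_instance

def pvWitness_process_direction_part1 : List (List Int) × String × Int × Int × Int × Int :=
  ([[0, 1], [1, 5]], "toggle", 0, 0, 1, 1)

def Spec_process_direction_part1 (grid : List (List Int)) (command : String) (start_x : Int) (start_y : Int) (end_x : Int) (end_y : Int) (out : Int) : Prop := out = process_direction_part1_alt grid command start_x start_y end_x end_y
instance (grid : List (List Int)) (command : String) (start_x : Int) (start_y : Int) (end_x : Int) (end_y : Int) (out : Int) : Decidable (Spec_process_direction_part1 grid command start_x start_y end_x end_y out) := by unfold Spec_process_direction_part1; infer_instance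

-- ===== CLAIM (what is proved, stated in full; the proofs are below) =====
def Claim_equal_process_direction_part1 : Prop := ∀ (grid : List (List Int)) (command : String) (start_x : Int) (start_y : Int) (end_x : Int) (end_y : Int), Dom_process_direction_part1 grid command start_x start_y end_x end_y → Pre_process_direction_part1 grid command start_x start_y end_x end_y → Spec_process_direction_part1 grid command start_x start_y end_x end_y (process_direction_part1 grid command start_x start_y end_x end_y)

-- ===== LEMMAS AND PROOFS =====

-- change of one cell of value v, for the three recognized commands
def cellDelta (c : String) (v : Int) : Int :=
  if c = "toggle" then (if v ≠ 0 then -1 else 1)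
  else if c = "turn on" then (if v ≠ 0 then 0 else 1)
  else if c = "turn off" then (if v ≠ 0 then -1 else 0)
  else 0

def rowDelta (c : String) (row : List Int) (ys : List Int) : Int :=
  (ys.map (fun y => cellDelta c (row.getD y.toNat 0))).sum

def rowCnt (row : List Int) (ys : List Int) : Int :=
  (ys.map (fun y => if row.getD y.toNat 0 ≠ 0 then (1 : Int) else 0)).sum

lemma getD_set_ne {α : Type} (l : List α) (i j : Nat) (v : α) (d : α) (h : i ≠ j) :
    (l.set i v).getD j d = l.getD j d := by
  simp [List.getD, List.getElem?_set_ne h]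

lemma pdA_step_unknown (c : String) (x y : Int) (st : List (List Int) × Int)
    (hc : ¬ (c = "toggle" ∨ c = "turn on" ∨ c = "turn off")) :
    pdA_step c x y st = st := by
  push_neg at hc
  unfold pdA_step
  rcases hgx : PySem.List.pyGet? st.1 x with _ | row
  · rfl
  · rcases hry : PySem.List.pyGet? row y with _ | v <;>
      simp [hry, hc.1, hc.2.1, hc.2.2]

lemma foldl_id {α β : Type} (l : List β) (a : α) : l.foldl (fun s _ => s) a = a := by
  induction l with
  | nil => rfl
  | cons b l ih => simpa using ih

lemma innerA (c : String) (x : Int) (hx0 : 0 ≤ x) :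
    ∀ (ys : List Int) (g : List (List Int)) (t : Int),
    x.toNat < g.length →
    (∀ y ∈ ys, 0 ≤ y ∧ y.toNat < (g.getD x.toNat []).length) →
    ys.Pairwise (· < ·) →
    (ys.foldl (fun st y => pdA_step c x y st) (g, t)).2 = t + rowDelta c (g.getD x.toNat []) ys
    ∧ (ys.foldl (fun st y => pdA_step c x y st) (g, t)).1.length = g.length
    ∧ (∀ j : Nat, j ≠ x.toNat → ((ys.foldl (fun st y => pdA_step c x y st) (g, t)).1).getD j [] = g.getD j []) := by
  intro ys
  induction ys with
  | nil => intro g t _ _ _; simp [rowDelta]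
  | cons y ys ih =>
    intro g t hxl hb hp
    obtain ⟨hy0, hyl⟩ := hb y (by simp)
    have hrow : g.getD x.toNat [] = g[x.toNat] := List.getD_eq_getElem g [] hxl
    have hyl' : y.toNat < (g[x.toNat]).length := by rw [← hrow]; exact hyl
    have hgx : PySem.List.pyGet? g x = some g[x.toNat] :=
      PySem.List.pyGet?_eq_some_getElem g hx0 (by omega)
    have hry : PySem.List.pyGet? g[x.toNat] y = some (g[x.toNat])[y.toNat] :=
      PySem.List.pyGet?_eq_some_getElem _ hy0 (by omega)
    have hval : (g.getD x.toNat []).getD y.toNat 0 = (g[x.toNat])[y.toNat] := by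
      rw [hrow]; exact List.getD_eq_getElem _ 0 hyl'
    have hne : ∀ y' ∈ ys, y'.toNat ≠ y.toNat := by
      intro y' hy'
      have hlt : y < y' := (List.pairwise_cons.mp hp).1 y' hy'
      omega
    -- behaviour of the tail fold after an (optional) write of nv at (x, y)
    have key : ∀ (nv : Int) (t' : Int),
        ((ys.foldl (fun st y => pdA_step c x y st)
            (g.set x.toNat ((g[x.toNat]).set y.toNat nv), t')).2 =
              t' + rowDelta c (g.getD x.toNat []) ys)
        ∧ (ys.foldl (fun st y => pdA_step c x y st)
            (g.set x.toNat ((g[x.toNat]).set y.toNat nv), t')).1.length = g.length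
        ∧ (∀ j : Nat, j ≠ x.toNat →
            ((ys.foldl (fun st y => pdA_step c x y st)
              (g.set x.toNat ((g[x.toNat]).set y.toNat nv), t')).1).getD j [] = g.getD j []) := by
      intro nv t'
      set g1 := g.set x.toNat ((g[x.toNat]).set y.toNat nv) with hg1
      have hlen1 : g1.length = g.length := by simp [hg1]
      have hrow1 : g1.getD x.toNat [] = (g[x.toNat]).set y.toNat nv := by
        rw [hg1, List.getD_eq_getElem _ [] (by simpa using hxl), List.getElem_set_self]
      have hbd1 : ∀ y' ∈ ys, 0 ≤ y' ∧ y'.toNat < (g1.getD x.toNat []).length := by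
        intro y' hy'
        obtain ⟨h1, h2⟩ := hb y' (by simp [hy'])
        exact ⟨h1, by rw [hrow1]; simpa [← hrow] using h2⟩
      obtain ⟨ih1, ih2, ih3⟩ := ih g1 t' (by omega) hbd1 (List.pairwise_cons.mp hp).2
      refine ⟨?_, by omega, ?_⟩
      · rw [ih1]
        congr 1
        unfold rowDelta
        congr 1
        apply List.map_congr_left
        intro y' hy'
        rw [hrow1, hrow, getD_set_ne _ _ _ _ _ (fun h => hne y' hy' h.symm)]
      · intro j hj
        rw [ih3 j hj, hg1, getD_set_ne _ _ _ _ _ (fun h => hj h.symm)]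
    have hsame := ih g t hxl (fun y' hy' => hb y' (by simp [hy'])) (List.pairwise_cons.mp hp).2
    have hrd : rowDelta c (g.getD x.toNat []) (y :: ys)
        = cellDelta c ((g[x.toNat])[y.toNat]) + rowDelta c (g.getD x.toNat []) ys := by
      unfold rowDelta
      rw [List.map_cons, List.sum_cons, hval]
    simp only [List.foldl_cons]
    rw [hrd]
    by_cases h1 : c = "toggle"
    · by_cases hv : (g[x.toNat])[y.toNat] ≠ 0
      · have hs : pdA_step c x y (g, t) = (g.set x.toNat ((g[x.toNat]).set y.toNat 0), t - 1) := by
          simp [pdA_step, hgx, hry, h1, hv]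
        rw [hs]
        obtain ⟨k1, k2, k3⟩ := key 0 (t - 1)
        have hcd : cellDelta c ((g[x.toNat])[y.toNat]) = -1 := by simp [cellDelta, h1, hv]
        exact ⟨by rw [k1, hcd]; ring, k2, k3⟩
      · have hs : pdA_step c x y (g, t) = (g.set x.toNat ((g[x.toNat]).set y.toNat 1), t + 1) := by
          simp [pdA_step, hgx, hry, h1, hv]
        rw [hs]
        obtain ⟨k1, k2, k3⟩ := key 1 (t + 1)
        have hcd : cellDelta c ((g[x.toNat])[y.toNat]) = 1 := by simp [cellDelta, h1, hv]
        exact ⟨by rw [k1, hcd]; ring, k2, k3⟩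
    · by_cases h2 : c = "turn on"
      · by_cases hv : (g[x.toNat])[y.toNat] ≠ 0
        · have hs : pdA_step c x y (g, t) = (g, t) := by
            simp [pdA_step, hgx, hry, h1, h2, hv]
          rw [hs]
          obtain ⟨k1, k2, k3⟩ := hsame
          have hcd : cellDelta c ((g[x.toNat])[y.toNat]) = 0 := by simp [cellDelta, h1, h2, hv]
          exact ⟨by rw [k1, hcd]; ring, k2, k3⟩
        · have hs : pdA_step c x y (g, t) = (g.set x.toNat ((g[x.toNat]).set y.toNat 1), t + 1) := by
            simp [pdA_step, hgx, hry, h1, h2, hv]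
          rw [hs]
          obtain ⟨k1, k2, k3⟩ := key 1 (t + 1)
          have hcd : cellDelta c ((g[x.toNat])[y.toNat]) = 1 := by simp [cellDelta, h1, h2, hv]
          exact ⟨by rw [k1, hcd]; ring, k2, k3⟩
      · by_cases h3 : c = "turn off"
        · by_cases hv : (g[x.toNat])[y.toNat] ≠ 0
          · have hs : pdA_step c x y (g, t) = (g.set x.toNat ((g[x.toNat]).set y.toNat 0), t - 1) := by
              simp [pdA_step, hgx, hry, h1, h2, h3, hv]
            rw [hs]
            obtain ⟨k1, k2, k3⟩ := key 0 (t - 1)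
            have hcd : cellDelta c ((g[x.toNat])[y.toNat]) = -1 := by simp [cellDelta, h1, h2, h3, hv]
            exact ⟨by rw [k1, hcd]; ring, k2, k3⟩
          · have hs : pdA_step c x y (g, t) = (g, t) := by
              simp [pdA_step, hgx, hry, h1, h2, h3, hv]
            rw [hs]
            obtain ⟨k1, k2, k3⟩ := hsame
            have hcd : cellDelta c ((g[x.toNat])[y.toNat]) = 0 := by simp [cellDelta, h1, h2, h3, hv]
            exact ⟨by rw [k1, hcd]; ring, k2, k3⟩
        · have hs : pdA_step c x y (g, t) = (g, t) := by
            simp [pdA_step, hgx, hry, h1, h2, h3]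
          rw [hs]
          obtain ⟨k1, k2, k3⟩ := hsame
          have hcd : cellDelta c ((g[x.toNat])[y.toNat]) = 0 := by simp [cellDelta, h1, h2, h3]
          exact ⟨by rw [k1, hcd]; ring, k2, k3⟩

lemma outerA (c : String) (ys : List Int) (hysP : ys.Pairwise (· < ·)) :
    ∀ (xs : List Int) (g : List (List Int)) (t : Int),
    (∀ x ∈ xs, 0 ≤ x ∧ x.toNat < g.length) →
    xs.Pairwise (· < ·) →
    (∀ x ∈ xs, ∀ y ∈ ys, 0 ≤ y ∧ y.toNat < (g.getD x.toNat []).length) →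
    (xs.foldl (fun st x => ys.foldl (fun st2 y => pdA_step c x y st2) st) (g, t)).2
      = t + (xs.map (fun x => rowDelta c (g.getD x.toNat []) ys)).sum := by
  intro xs
  induction xs with
  | nil => intro g t _ _ _; simp
  | cons x xs ih =>
    intro g t hb hp hby
    obtain ⟨hx0, hxl⟩ := hb x (by simp)
    obtain ⟨i1, i2, i3⟩ := innerA c x hx0 ys g t hxl (hby x (by simp)) hysP
    set r := ys.foldl (fun st y => pdA_step c x y st) (g, t) with hr
    have hxs_ne : ∀ x' ∈ xs, x'.toNat ≠ x.toNat := by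
      intro x' hx'
      have hlt : x < x' := (List.pairwise_cons.mp hp).1 x' hx'
      omega
    have hrows : ∀ x' ∈ xs, r.1.getD x'.toNat [] = g.getD x'.toNat [] := by
      intro x' hx'; exact i3 _ (hxs_ne x' hx')
    have hrec := ih r.1 r.2
      (by intro x' hx'; obtain ⟨h1, h2⟩ := hb x' (by simp [hx']); exact ⟨h1, by omega⟩)
      (List.pairwise_cons.mp hp).2
      (by intro x' hx' y hy
          rw [hrows x' hx']
          exact hby x' (by simp [hx']) y hy)
    simp only [List.foldl_cons, ← hr]
    rw [show r = (r.1, r.2) from rfl] at hrec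
    rw [hrec, i1]
    have hsum : (xs.map (fun x' => rowDelta c (r.1.getD x'.toNat []) ys)).sum
        = (xs.map (fun x' => rowDelta c (g.getD x'.toNat []) ys)).sum := by
      congr 1
      apply List.map_congr_left
      intro x' hx'; rw [hrows x' hx']
    rw [hsum]
    simp only [List.map_cons, List.sum_cons]
    ring

lemma countB_inner (row : List Int) :
    ∀ (ys : List Int) (a : Int),
    (∀ y ∈ ys, 0 ≤ y ∧ y.toNat < row.length) →
    (ys.foldl (fun a2 y =>
      match PySem.List.pyGet? row y with
      | none => a2
      | some v => if v ≠ 0 then a2 + 1 else a2) a) = a + rowCnt row ys := by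
  intro ys
  induction ys with
  | nil => intro a _; simp [rowCnt]
  | cons y ys ih =>
    intro a hb
    obtain ⟨hy0, hyl⟩ := hb y (by simp)
    have hry : PySem.List.pyGet? row y = some row[y.toNat] :=
      PySem.List.pyGet?_eq_some_getElem row hy0 (by omega)
    have hval : row.getD y.toNat 0 = row[y.toNat] := List.getD_eq_getElem row 0 hyl
    have hrc : rowCnt row (y :: ys)
        = (if row[y.toNat] ≠ 0 then (1 : Int) else 0) + rowCnt row ys := by
      unfold rowCnt
      rw [List.map_cons, List.sum_cons, hval]
    simp only [List.foldl_cons, hry]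
    rw [hrc]
    by_cases hv : row[y.toNat] ≠ 0
    · simp only [if_pos hv]
      rw [ih _ (fun y' hy' => hb y' (by simp [hy']))]
      ring
    · simp only [if_neg hv]
      rw [ih _ (fun y' hy' => hb y' (by simp [hy']))]
      ring

lemma countB_eq (g : List (List Int)) (ys : List Int) :
    ∀ (xs : List Int) (a : Int),
    (∀ x ∈ xs, 0 ≤ x ∧ x.toNat < g.length) →
    (∀ x ∈ xs, ∀ y ∈ ys, 0 ≤ y ∧ y.toNat < (g.getD x.toNat []).length) →
    (xs.foldl (fun a x =>
      ys.foldl (fun a2 y =>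
        match PySem.List.pyGet? g x with
        | none => a2
        | some row =>
          match PySem.List.pyGet? row y with
          | none => a2
          | some v => if v ≠ 0 then a2 + 1 else a2) a) a)
      = a + (xs.map (fun x => rowCnt (g.getD x.toNat []) ys)).sum := by
  intro xs
  induction xs with
  | nil => intro a _ _; simp
  | cons x xs ih =>
    intro a hb hby
    obtain ⟨hx0, hxl⟩ := hb x (by simp)
    have hrow : g.getD x.toNat [] = g[x.toNat] := List.getD_eq_getElem g [] hxl
    have hgx : PySem.List.pyGet? g x = some (g.getD x.toNat []) := by
      rw [hrow]; exact PySem.List.pyGet?_eq_some_getElem g hx0 (by omega)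
    simp only [List.foldl_cons, hgx]
    rw [countB_inner (g.getD x.toNat []) ys a (hby x (by simp))]
    rw [ih _ (fun x' hx' => hb x' (by simp [hx'])) (fun x' hx' => hby x' (by simp [hx']))]
    simp only [List.map_cons, List.sum_cons]
    ring

lemma rowDelta_formula (c : String) (row : List Int) (ys : List Int) :
    rowDelta c row ys =
      if c = "toggle" then (ys.length : Int) - 2 * rowCnt row ys
      else if c = "turn on" then (ys.length : Int) - rowCnt row ys
      else if c = "turn off" then - rowCnt row ys
      else 0 := by
  induction ys with
  | nil => simp [rowDelta, rowCnt]
  | cons y ys ih =>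
    unfold rowDelta rowCnt at *
    simp only [List.map_cons, List.sum_cons, List.length_cons] at *
    by_cases hv : row.getD y.toNat 0 = 0 <;>
      by_cases h1 : c = "toggle" <;> by_cases h2 : c = "turn on" <;> by_cases h3 : c = "turn off" <;>
        simp [cellDelta, h1, h2, h3, hv] at ih ⊢ <;> push_cast at ih ⊢ <;> omega

lemma sum_affine (f : Int → Int) (A B : Int) (xs : List Int) :
    (xs.map (fun x => A + B * f x)).sum = (xs.length : Int) * A + B * (xs.map f).sum := by
  induction xs with
  | nil => simp
  | cons x xs ih => simp [ih]; push_cast; ring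

-- ===== VERDICT (by name: the statement is the Claim_ definition above) =====
theorem process_direction_part1_spec : Claim_equal_process_direction_part1 := by
  intro grid command sx sy ex ey _ hpre
  unfold Spec_process_direction_part1 process_direction_part1 process_direction_part1_alt
  by_cases hc : command = "toggle" ∨ command = "turn on" ∨ command = "turn off"
  case neg =>
    -- unknown command: A's loop body never fires, B returns 0 up front
    have hstep : ∀ (st : List (List Int) × Int) (x : Int),
        (PySem.List.pyRange sy (ey + 1) 1).foldl (fun st2 y => pdA_step command x y st2) st = st := by
      intro st x
      induction (PySem.List.pyRange sy (ey + 1) 1) generalizing st with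
      | nil => rfl
      | cons y ys ih => simp only [List.foldl_cons, pdA_step_unknown command x y st hc, ih]
    have hfold : (PySem.List.pyRange sx (ex + 1) 1).foldl
        (fun st x => (PySem.List.pyRange sy (ey + 1) 1).foldl (fun st2 y => pdA_step command x y st2) st)
        (grid, 0) = (grid, 0) := by
      simp only [hstep]
      exact foldl_id _ _
    rw [hfold]
    have hnc : ¬ (command = "turn on" ∨ command = "turn off" ∨ command = "toggle") := by tauto
    simp [hnc]
  case pos =>
    have hbif : (command = "turn on" ∨ command = "turn off" ∨ command = "toggle") := by tauto
    by_cases hxe : sx ≤ ex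
    case neg =>
      have hnil : PySem.List.pyRange sx (ex + 1) 1 = [] :=
        PySem.List.pyRange_one_eq_nil (by omega)
      simp only [hnil, List.foldl_nil]
      unfold pdB_count
      simp only [hnil, List.foldl_nil, List.length_nil]
      rcases hc with h | h | h <;> simp [h, hbif]
    case pos =>
    by_cases hye : sy ≤ ey
    case neg =>
      have hnil : PySem.List.pyRange sy (ey + 1) 1 = [] :=
        PySem.List.pyRange_one_eq_nil (by omega)
      simp only [hnil, List.foldl_nil]
      rw [foldl_id]
      unfold pdB_count
      simp only [hnil, List.foldl_nil]
      rw [foldl_id]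
      rcases hc with h | h | h <;> simp [h, hbif]
    case pos =>
      obtain ⟨hsx0, hexl, hsy0, hrowsP⟩ := hpre hc hxe hye
      set xs := PySem.List.pyRange sx (ex + 1) 1 with hxs
      set ys := PySem.List.pyRange sy (ey + 1) 1 with hys
      have hxmem : ∀ x ∈ xs, 0 ≤ x ∧ x.toNat < grid.length := by
        intro x hx
        rw [hxs, PySem.List.mem_pyRange_one] at hx
        omega
      have hymem : ∀ x ∈ xs, ∀ y ∈ ys, 0 ≤ y ∧ y.toNat < (grid.getD x.toNat []).length := by
        intro x hx y hy
        rw [hxs, PySem.List.mem_pyRange_one] at hx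
        rw [hys, PySem.List.mem_pyRange_one] at hy
        have hxl : x.toNat < grid.length := by omega
        have hmem : (grid[x.toNat], x.toNat) ∈ grid.zipIdx := by
          have hz : grid.zipIdx[x.toNat]'(by simpa using hxl) = (grid[x.toNat], x.toNat) := by
            rw [List.getElem_zipIdx]; simp
          rw [← hz]
          exact List.getElem_mem _
        have hb := hrowsP _ hmem (by simp; omega) (by simp; omega)
        simp only at hb
        refine ⟨by omega, ?_⟩
        rw [List.getD_eq_getElem grid [] hxl]
        omega
      have hA := outerA command ys (PySem.List.pairwise_lt_pyRange_one sy (ey + 1)) xs grid 0 hxmem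
        (PySem.List.pairwise_lt_pyRange_one sx (ex + 1)) hymem
      have hcnt := countB_eq grid ys xs 0 hxmem hymem
      rcases hc with h | h | h
      · -- toggle
        subst h
        rw [hA]
        unfold pdB_count
        simp only []
        rw [hcnt]
        have hmap : (xs.map (fun x => rowDelta "toggle" (grid.getD x.toNat []) ys)).sum
            = (xs.map (fun x => (ys.length : Int) + (-2) * rowCnt (grid.getD x.toNat []) ys)).sum := by
          congr 1; apply List.map_congr_left; intro x hx
          rw [rowDelta_formula]; simp; try ring
        rw [hmap, sum_affine]
        simp
        try push_cast
        try ring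
      · -- turn on
        subst h
        rw [hA]
        unfold pdB_count
        simp only []
        rw [hcnt]
        have hmap : (xs.map (fun x => rowDelta "turn on" (grid.getD x.toNat []) ys)).sum
            = (xs.map (fun x => (ys.length : Int) + (-1) * rowCnt (grid.getD x.toNat []) ys)).sum := by
          congr 1; apply List.map_congr_left; intro x hx
          rw [rowDelta_formula]; simp; try ring
        rw [hmap, sum_affine]
        simp
        try push_cast
        try ring
      · -- turn off
        subst h
        rw [hA]
        unfold pdB_count
        simp only []
        rw [hcnt]
        have hmap : (xs.map (fun x => rowDelta "turn off" (grid.getD x.toNat []) ys)).sum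
            = (xs.map (fun x => (0 : Int) + (-1) * rowCnt (grid.getD x.toNat []) ys)).sum := by
          congr 1; apply List.map_congr_left; intro x hx
          rw [rowDelta_formula]; simp
        rw [hmap, sum_affine]
        simp
        try push_cast
        try ring
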